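-- pv_equiv track=rewrite | github.com/shaze/synth2 | scripts/refam.py | getPlates
-- ===== SOURCE A (Python) =====
-- row_choice="ABCDEFGH"
--
-- def getPlates(batches):
--     plate = {}
--     for bnum in batches.values():
--         curr_plate = "WP65"+"%04d"%(bnum*3)
--         curr_elt = 0
--         plate_num= 0
--         for i in batches.keys():
--             if batches[i] != bnum: continue
--             if curr_elt==96:
--                 plate_num=plate_num+1
--                 curr_elt=0
--             row = row_choice[curr_elt//12]
--             col = curr_elt%12+1
--             plate[i]=("%s%03d"%(curr_plate,plate_num),"%s%02d"%(row,col))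
--             curr_elt=curr_elt+1
--     return plate
-- ===== SOURCE B (Python) =====
-- row_choice="ABCDEFGH"
--
-- def getPlates(batches):
--     # One pass: group keys by batch number (insertion order), then label each
--     # group once by position; O(K) instead of a full key scan per value.
--     groups = {}
--     for k, b in batches.items():
--         groups.setdefault(b, []).append(k)
--     plate = {}
--     for b, ks in groups.items():
--         cp = "WP65" + "%04d" % (b * 3)
--         for pos, k in enumerate(ks):
--             pn, elt = divmod(pos, 96)
--             plate[k] = ("%s%03d" % (cp, pn),
--                         "%s%02d" % (row_choice[elt // 12], elt % 12 + 1))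
--     return plate
-- ===== Notes on version B (the rewrite author's own statement) =====
-- stated objective: faster
-- what changed: B groups the keys by batch number in a single pass over the dict (setdefault-append) and labels each group once by enumerated position with divmod, instead of A's rescan of every key for every value (with a reset-counter state machine) repeated even for duplicate batch numbers.
import Mathlib
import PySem

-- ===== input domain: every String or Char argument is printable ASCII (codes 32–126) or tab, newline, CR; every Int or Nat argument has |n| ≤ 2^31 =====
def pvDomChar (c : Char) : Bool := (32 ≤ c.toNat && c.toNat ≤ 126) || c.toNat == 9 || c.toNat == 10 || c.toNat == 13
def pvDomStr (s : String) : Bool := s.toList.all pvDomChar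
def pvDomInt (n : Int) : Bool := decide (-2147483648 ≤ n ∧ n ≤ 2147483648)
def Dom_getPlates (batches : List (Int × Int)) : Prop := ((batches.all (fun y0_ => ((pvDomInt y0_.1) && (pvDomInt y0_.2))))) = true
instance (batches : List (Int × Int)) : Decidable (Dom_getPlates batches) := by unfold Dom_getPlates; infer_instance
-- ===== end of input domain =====

-- B groups the keys by batch number in one pass and labels each group by position,
-- replacing A's full scan of all keys for every value (alternative objective: O(K) grouping vs A's repeated scans).

def row_choice : String := "ABCDEFGH"

-- ===== PORT A =====
-- inner-loop body of A ("for i in batches.keys(): …"); "%0Nd" on an int is str(n).zfill(N), exact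
def pvStepA (d : PySem.Dict Int Int) (bnum : Int) (curr_plate : String)
    (st : PySem.Dict Int (String × String) × Int × Int) (i : Int) :
    PySem.Dict Int (String × String) × Int × Int :=
  if d.getD i 0 ≠ bnum then st
  else
    let plate := st.1
    let curr_elt := st.2.1
    let plate_num := st.2.2
    let plate_num := if curr_elt = 96 then plate_num + 1 else plate_num
    let curr_elt := if curr_elt = 96 then (0 : Int) else curr_elt
    -- row_choice[curr_elt//12]: the index is always in range, the .getD "" default is unreachable
    let row := ((PySem.Str.pyGet? row_choice (PySem.Int.floordiv curr_elt 12)).map String.singleton).getD ""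
    let col := PySem.Int.mod curr_elt 12 + 1
    (plate.insert i (curr_plate ++ PySem.Str.zfill (PySem.Int.toStr plate_num) 3,
                     row ++ PySem.Str.zfill (PySem.Int.toStr col) 2),
     curr_elt + 1, plate_num)

def getPlates (batches : List (Int × Int)) : List (Int × String × String) :=
  let d := PySem.Dict.ofList batches
  (d.values.foldl (fun plate bnum =>
      let curr_plate := "WP65" ++ PySem.Str.zfill (PySem.Int.toStr (bnum * 3)) 4
      (d.keys.foldl (pvStepA d bnum curr_plate) (plate, 0, 0)).1)
    PySem.Dict.empty).items

-- ===== PORT B =====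
-- body of B's "for pos, k in enumerate(ks): …" (pn, elt = divmod(pos, 96))
def pvStepB (cp : String) (plate : PySem.Dict Int (String × String)) (pk : Int × Int) :
    PySem.Dict Int (String × String) :=
  let pn := PySem.Int.floordiv pk.1 96
  let elt := PySem.Int.mod pk.1 96
  plate.insert pk.2 (cp ++ PySem.Str.zfill (PySem.Int.toStr pn) 3,
    (((PySem.Str.pyGet? row_choice (PySem.Int.floordiv elt 12)).map String.singleton).getD "") ++
      PySem.Str.zfill (PySem.Int.toStr (PySem.Int.mod elt 12 + 1)) 2)

def getPlates_alt (batches : List (Int × Int)) : List (Int × String × String) :=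
  let d := PySem.Dict.ofList batches
  -- groups.setdefault(b, []).append(k)  ==  groups[b] = groups.get(b, []) + [k]
  let groups : PySem.Dict Int (List Int) :=
    d.items.foldl (fun g p => g.modify p.2 [] (· ++ [p.1])) PySem.Dict.empty
  (groups.items.foldl (fun plate bks =>
      let cp := "WP65" ++ PySem.Str.zfill (PySem.Int.toStr (bks.1 * 3)) 4
      (PySem.List.enumerate bks.2 0).foldl (pvStepB cp) plate)
    PySem.Dict.empty).items

-- ===== PRECONDITION & SPEC =====
def Spec_getPlates (batches : List (Int × Int)) (out : List (Int × String × String)) : Prop := out = getPlates_alt batches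
instance (batches : List (Int × Int)) (out : List (Int × String × String)) : Decidable (Spec_getPlates batches out) := by unfold Spec_getPlates; infer_instance

-- ===== CLAIM (what is proved, stated in full; the proofs are below) =====
def Claim_equal_getPlates : Prop := ∀ (batches : List (Int × Int)), Dom_getPlates batches → Spec_getPlates batches (getPlates batches)

-- ===== LEMMAS AND PROOFS =====

-- the label stored for the key at position `pos` of the group with plate prefix `cp`
def pvLabel (cp : String) (pos : Int) : String × String :=
  (cp ++ PySem.Str.zfill (PySem.Int.toStr (PySem.Int.floordiv pos 96)) 3,
   ((PySem.Str.pyGet? row_choice (PySem.Int.floordiv (PySem.Int.mod pos 96) 12)).map String.singleton).getD "" ++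
     PySem.Str.zfill (PySem.Int.toStr (PySem.Int.mod (PySem.Int.mod pos 96) 12 + 1)) 2)

def pvCp (b : Int) : String := "WP65" ++ PySem.Str.zfill (PySem.Int.toStr (b * 3)) 4

-- the else-branch of pvStepA (the body executed when the guard passes)
def pvBody (curr_plate : String) (st : PySem.Dict Int (String × String) × Int × Int) (i : Int) :
    PySem.Dict Int (String × String) × Int × Int :=
  let plate := st.1
  let curr_elt := st.2.1
  let plate_num := st.2.2
  let plate_num := if curr_elt = 96 then plate_num + 1 else plate_num
  let curr_elt := if curr_elt = 96 then (0 : Int) else curr_elt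
  let row := ((PySem.Str.pyGet? row_choice (PySem.Int.floordiv curr_elt 12)).map String.singleton).getD ""
  let col := PySem.Int.mod curr_elt 12 + 1
  (plate.insert i (curr_plate ++ PySem.Str.zfill (PySem.Int.toStr plate_num) 3,
                   row ++ PySem.Str.zfill (PySem.Int.toStr col) 2),
   curr_elt + 1, plate_num)

def pvKeysOf (d : PySem.Dict Int Int) (b : Int) : List Int :=
  (d.items.filter (fun p => p.2 == b)).map (·.1)

def pvAssign (d : PySem.Dict Int Int) (b : Int) : List (Int × String × String) :=
  (PySem.List.enumerate (pvKeysOf d b) 0).map (fun pk => (pk.2, pvLabel (pvCp b) pk.1))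

def pvItemsOf (d : PySem.Dict Int Int) (bs : List Int) : List (Int × String × String) :=
  bs.flatMap (pvAssign d)

def pvF (d : PySem.Dict Int Int) (plate : PySem.Dict Int (String × String)) (b : Int) :
    PySem.Dict Int (String × String) :=
  (PySem.List.enumerate (pvKeysOf d b) 0).foldl
    (fun pl pk => pl.insert pk.2 (pvLabel (pvCp b) pk.1)) plate

-- A's (curr_elt, plate_num) state after j placements
def pvEnc (j : Nat) : Int × Int :=
  if j % 96 = 0 ∧ j ≠ 0 then (96, ((j / 96 : Nat) : Int) - 1)
  else (((j % 96 : Nat) : Int), ((j / 96 : Nat) : Int))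

theorem pvFloordiv_cast (j m : Nat) : PySem.Int.floordiv (j : Int) (m : Int) = ((j / m : Nat) : Int) := by
  have h : (0 : Int) ≤ (m : Int) ∨ ((m : Int) ∣ (j : Int)) := Or.inl (Int.natCast_nonneg m)
  simp [PySem.Int.floordiv, Int.fdiv_eq_ediv]

theorem pvMod_cast (j m : Nat) : PySem.Int.mod (j : Int) (m : Int) = ((j % m : Nat) : Int) := by
  have h : (0 : Int) ≤ (m : Int) ∨ ((m : Int) ∣ (j : Int)) := Or.inl (Int.natCast_nonneg m)
  simp [PySem.Int.mod, Int.fmod_eq_emod]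

theorem pvStepA_eq (d : PySem.Dict Int Int) (b : Int) (cp : String) :
    pvStepA d b cp = fun st i => if d.getD i 0 = b then pvBody cp st i else st := by
  funext st i
  by_cases h : d.getD i 0 = b <;> simp [pvStepA, pvBody, h]

theorem pvEnc_zero : pvEnc 0 = ((0 : Int), (0 : Int)) := by
  unfold pvEnc; norm_num

theorem pvEnc_reset (j : Nat) :
    ((if (pvEnc j).1 = 96 then (0 : Int) else (pvEnc j).1),
     (if (pvEnc j).1 = 96 then (pvEnc j).2 + 1 else (pvEnc j).2)) =
      (PySem.Int.mod (j : Int) 96, PySem.Int.floordiv (j : Int) 96) := by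
  have hm : PySem.Int.mod (j : Int) 96 = ((j % 96 : Nat) : Int) := by simpa using pvMod_cast j 96
  have hf : PySem.Int.floordiv (j : Int) 96 = ((j / 96 : Nat) : Int) := by simpa using pvFloordiv_cast j 96
  rw [hm, hf]
  unfold pvEnc
  by_cases hc : j % 96 = 0 ∧ j ≠ 0
  · rw [if_pos hc]
    simp only [Prod.mk.injEq]
    constructor <;> · simp only [if_true]; omega
  · rw [if_neg hc]
    have h96 : ¬ (((j % 96 : Nat) : Int) = 96) := by omega
    simp only [h96, if_false]

theorem pvEnc_succ (j : Nat) :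
    pvEnc (j + 1) = (PySem.Int.mod (j : Int) 96 + 1, PySem.Int.floordiv (j : Int) 96) := by
  have hm : PySem.Int.mod (j : Int) 96 = ((j % 96 : Nat) : Int) := by simpa using pvMod_cast j 96
  have hf : PySem.Int.floordiv (j : Int) 96 = ((j / 96 : Nat) : Int) := by simpa using pvFloordiv_cast j 96
  rw [hm, hf]
  unfold pvEnc
  by_cases hc : (j + 1) % 96 = 0 ∧ j + 1 ≠ 0
  · rw [if_pos hc]
    simp only [Prod.mk.injEq]
    constructor <;> omega
  · rw [if_neg hc]
    simp only [Prod.mk.injEq]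
    constructor <;> omega

-- one A-step from the encoded state stores pvLabel and advances the counter
theorem pvBody_enc (cp : String) (plate : PySem.Dict Int (String × String)) (j : Nat) (i : Int) :
    pvBody cp (plate, pvEnc j) i = (plate.insert i (pvLabel cp (j : Int)), pvEnc (j + 1)) := by
  have hr := pvEnc_reset j
  rw [Prod.mk.injEq] at hr
  unfold pvBody
  dsimp only
  rw [hr.1, hr.2, pvEnc_succ, pvLabel]

theorem pvInnerA (cp : String) (ks : List Int)
    (plate : PySem.Dict Int (String × String)) (j : Nat) :
    ks.foldl (pvBody cp) (plate, pvEnc j) =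
      ((PySem.List.enumerate ks (j : Int)).foldl
        (fun pl pk => pl.insert pk.2 (pvLabel cp pk.1)) plate, pvEnc (j + ks.length)) := by
  induction ks generalizing plate j with
  | nil => simp [PySem.List.enumerate]
  | cons k ks ih =>
    rw [List.foldl_cons, pvBody_enc, PySem.List.enumerate_cons, List.foldl_cons, ih]
    have h1 : ((j : Int) + 1) = ((j + 1 : Nat) : Int) := by push_cast; ring
    have h2 : j + 1 + ks.length = j + (k :: ks).length := by simp; omega
    rw [h1, h2]

theorem pvKeys_filter (d : PySem.Dict Int Int) (hnd : d.keys.Nodup) (b : Int) :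
    d.keys.filter (fun i => d.getD i 0 == b) = pvKeysOf d b := by
  unfold pvKeysOf
  simp only [PySem.Dict.keys] at *
  rw [List.filter_map]
  congr 1
  apply List.filter_congr
  intro p hp
  have := PySem.Dict.getD_of_mem_items d (k := p.1) (v := p.2) (by simpa using hp) (by simpa using hnd) 0
  simp [Function.comp, this]

-- A's whole inner loop equals pvF
theorem pvProcessA_eq_F (d : PySem.Dict Int Int) (hnd : d.keys.Nodup) (b : Int)
    (plate : PySem.Dict Int (String × String)) :
    (d.keys.foldl (pvStepA d b (pvCp b)) (plate, 0, 0)).1 = pvF d plate b := by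
  rw [pvStepA_eq d b (pvCp b),
      PySem.List.foldl_ite_eq_foldl_filter (fun i => d.getD i 0 = b) (pvBody (pvCp b))]
  have hfe : d.keys.filter (fun i => decide (d.getD i 0 = b)) = pvKeysOf d b := by
    rw [← pvKeys_filter d hnd b]
    apply List.filter_congr
    intro i _
    rfl
  rw [hfe, show ((plate, (0 : Int), (0 : Int)) :
        PySem.Dict Int (String × String) × Int × Int) = (plate, pvEnc 0) by rw [pvEnc_zero],
      pvInnerA (pvCp b) (pvKeysOf d b) plate 0]
  simp [pvF]

theorem pvMem_keysOf (d : PySem.Dict Int Int) (b k : Int) :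
    k ∈ pvKeysOf d b ↔ (k, b) ∈ d.items := by
  unfold pvKeysOf
  simp only [List.mem_map, List.mem_filter, beq_iff_eq]
  constructor
  · rintro ⟨⟨a, c⟩, ⟨hmem, hcb⟩, h1⟩
    simp only at hcb h1
    subst hcb; subst h1; exact hmem
  · intro h
    exact ⟨(k, b), ⟨h, rfl⟩, rfl⟩

theorem pvKeysOf_nodup (d : PySem.Dict Int Int) (hnd : d.keys.Nodup) (b : Int) :
    (pvKeysOf d b).Nodup := by
  simp only [PySem.Dict.keys] at hnd
  exact hnd.sublist (List.Sublist.map _ List.filter_sublist)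

theorem pvValue_unique (d : PySem.Dict Int Int) (hnd : d.keys.Nodup) {k b b' : Int}
    (h : (k, b) ∈ d.items) (h' : (k, b') ∈ d.items) : b = b' := by
  have h1 := PySem.Dict.get?_of_mem_items d h hnd
  have h2 := PySem.Dict.get?_of_mem_items d h' hnd
  rw [h1] at h2
  exact (Option.some_inj.mp h2)

theorem pvItemsOf_keys (d : PySem.Dict Int Int) (bs : List Int) :
    (pvItemsOf d bs).map (·.1) = bs.flatMap (pvKeysOf d) := by
  unfold pvItemsOf pvAssign
  rw [List.map_flatMap]
  congr 1
  funext b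
  rw [List.map_map]
  exact PySem.List.map_snd_enumerate (pvKeysOf d b) 0

theorem pvFlat_nodup (d : PySem.Dict Int Int) (hnd : d.keys.Nodup) (bs : List Int)
    (hbs : bs.Nodup) : (bs.flatMap (pvKeysOf d)).Nodup := by
  induction bs with
  | nil => simp
  | cons b bs ih =>
    rw [List.nodup_cons] at hbs
    rw [List.flatMap_cons]
    apply List.Nodup.append (pvKeysOf_nodup d hnd b) (ih hbs.2)
    intro k hk hk'
    rw [pvMem_keysOf] at hk
    rcases List.mem_flatMap.mp hk' with ⟨b', hb', hkb'⟩
    rw [pvMem_keysOf] at hkb'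
    exact hbs.1 (pvValue_unique d hnd hk hkb' ▸ hb')

theorem pvInsert_self (plate : PySem.Dict Int (String × String)) (hk : plate.keys.Nodup)
    (k : Int) (v : String × String) (h : plate.get? k = some v) : plate.insert k v = plate := by
  have hmem : (k, v) ∈ plate.items := PySem.Dict.mem_items_of_get?_eq_some plate h
  have hc : plate.contains k = true :=
    (PySem.Dict.contains_iff_mem_keys plate k).mpr (PySem.Dict.mem_keys_of_mem_items plate hmem)
  apply PySem.Dict.ext
  rw [PySem.Dict.items_insert_of_contains plate v hc]
  have hid : ∀ p ∈ plate.items, (if (p.1 == k) = true then (k, v) else p) = p := by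
    intro p hp
    by_cases hpk : p.1 = k
    · have hg := PySem.Dict.get?_of_mem_items plate (k := p.1) (v := p.2) (by simpa using hp) hk
      rw [hpk, h] at hg
      simp only [hpk, beq_self_eq_true, if_true]
      rw [Prod.ext_iff]
      exact ⟨hpk.symm, Option.some_inj.mp hg⟩
    · simp [hpk]
  rw [List.map_congr_left hid]
  simp

theorem pvFold_noop (cp : String) (l : List (Int × Int)) (plate : PySem.Dict Int (String × String))
    (hk : plate.keys.Nodup) (h : ∀ pk ∈ l, plate.get? pk.2 = some (pvLabel cp pk.1)) :
    l.foldl (fun pl pk => pl.insert pk.2 (pvLabel cp pk.1)) plate = plate := by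
  induction l with
  | nil => rfl
  | cons pk l ih =>
    rw [List.foldl_cons, pvInsert_self plate hk _ _ (h pk (by simp))]
    exact ih (fun q hq => h q (by simp [hq]))

theorem pvMkItems_keys_nodup (d : PySem.Dict Int Int) (hnd : d.keys.Nodup) (bs : List Int)
    (hbs : bs.Nodup) : (PySem.Dict.mk (pvItemsOf d bs)).keys.Nodup := by
  simp only [PySem.Dict.keys]
  show ((pvItemsOf d bs).map (·.1)).Nodup
  rw [pvItemsOf_keys]
  exact pvFlat_nodup d hnd bs hbs

theorem pvStepF (d : PySem.Dict Int Int) (hnd : d.keys.Nodup) (b : Int) (bs : List Int)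
    (hbs : bs.Nodup) :
    pvF d (PySem.Dict.mk (pvItemsOf d bs)) b = PySem.Dict.mk (pvItemsOf d (PySem.Set.add bs b)) := by
  by_cases hb : b ∈ bs
  · rw [PySem.Set.add_of_mem hb]
    unfold pvF
    apply pvFold_noop
    · exact pvMkItems_keys_nodup d hnd bs hbs
    · intro pk hpk
      apply PySem.Dict.get?_of_mem_items _ _ (pvMkItems_keys_nodup d hnd bs hbs)
      show (pk.2, pvLabel (pvCp b) pk.1) ∈ pvItemsOf d bs
      exact List.mem_flatMap.mpr ⟨b, hb, List.mem_map_of_mem hpk⟩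
  · rw [PySem.Set.add_of_not_mem hb]
    apply PySem.Dict.ext
    unfold pvF
    rw [PySem.Dict.items_foldl_insert_fresh (PySem.List.enumerate (pvKeysOf d b) 0)
          (fun pk => pk.2) (fun pk => pvLabel (pvCp b) pk.1) (PySem.Dict.mk (pvItemsOf d bs))
          ?fresh ?nd]
    case fresh =>
      intro pk hpk
      rw [Bool.eq_false_iff]
      intro hcon
      rw [PySem.Dict.contains_iff_mem_keys] at hcon
      have hmem : pk.2 ∈ pvKeysOf d b := by
        have := PySem.List.map_snd_enumerate (pvKeysOf d b) 0
        rw [← this]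
        exact List.mem_map_of_mem hpk
      have hcon' : pk.2 ∈ bs.flatMap (pvKeysOf d) := by
        have hk : (PySem.Dict.mk (pvItemsOf d bs)).keys = (pvItemsOf d bs).map (·.1) := rfl
        rw [hk, pvItemsOf_keys] at hcon
        exact hcon
      rcases List.mem_flatMap.mp hcon' with ⟨b', hb', hkb'⟩
      rw [pvMem_keysOf] at hmem hkb'
      exact hb (pvValue_unique d hnd hmem hkb' ▸ hb')
    case nd =>
      rw [PySem.List.map_snd_enumerate]
      exact pvKeysOf_nodup d hnd b
    show pvItemsOf d bs ++ _ = pvItemsOf d (bs ++ [b])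
    unfold pvItemsOf
    rw [List.flatMap_append]
    simp [pvAssign]

theorem pvFoldF (d : PySem.Dict Int Int) (hnd : d.keys.Nodup) (vs : List Int) :
    ∀ (bs : List Int), bs.Nodup →
    vs.foldl (pvF d) (PySem.Dict.mk (pvItemsOf d bs)) =
      PySem.Dict.mk (pvItemsOf d (PySem.Set.update bs vs)) := by
  induction vs with
  | nil => intro bs _; rw [List.foldl_nil, PySem.Set.update_nil]
  | cons v vs ih =>
    intro bs hbs
    rw [List.foldl_cons, pvStepF d hnd v bs hbs, ih (PySem.Set.add bs v) (PySem.Set.nodup_add bs v hbs),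
        PySem.Set.update_cons]

-- B's groups dict: items are (b, keys of b) over the distinct values in order
theorem pvGroups_items (d : PySem.Dict Int Int) :
    (d.items.foldl (fun g p => g.modify p.2 [] (· ++ [p.1]))
      (PySem.Dict.empty : PySem.Dict Int (List Int))).items =
      (PySem.Set.ofList d.values).map (fun b => (b, pvKeysOf d b)) := by
  have hfold : d.items.foldl (fun g p => g.modify p.2 [] (· ++ [p.1]))
      (PySem.Dict.empty : PySem.Dict Int (List Int)) =
      (d.items.map (fun p => (p.2, p.1))).foldl
        (fun g q => g.modify q.1 [] (fun x => x ++ [q.2])) PySem.Dict.empty := by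
    rw [List.foldl_map]
  have hkeys : (d.items.foldl (fun g p => g.modify p.2 [] (· ++ [p.1]))
      (PySem.Dict.empty : PySem.Dict Int (List Int))).keys = PySem.Set.ofList d.values := by
    rw [show (fun (g : PySem.Dict Int (List Int)) (p : Int × Int) => g.modify p.2 [] (· ++ [p.1])) =
          (fun g p => g.modify ((fun (q : Int × Int) => q.2) p) []
            ((fun (_ : PySem.Dict Int (List Int)) (q : Int × Int) (x : List Int) => x ++ [q.1]) g p))
        from rfl,
        PySem.Dict.keys_foldl_modify_key]
    rw [PySem.Dict.keys_empty, PySem.Set.update_nil_left]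
    rfl
  have hnodup : (d.items.foldl (fun g p => g.modify p.2 [] (· ++ [p.1]))
      (PySem.Dict.empty : PySem.Dict Int (List Int))).keys.Nodup := by
    rw [hkeys]; exact PySem.Set.nodup_ofList _
  have hget : ∀ c, (d.items.foldl (fun g p => g.modify p.2 [] (· ++ [p.1]))
      (PySem.Dict.empty : PySem.Dict Int (List Int))).getD c [] = pvKeysOf d c := by
    intro c
    rw [hfold, PySem.Dict.getD_foldl_modify_append, PySem.Dict.getD_empty]
    simp only [List.nil_append, List.filter_map, List.map_map]
    rfl
  rw [PySem.Dict.items_eq_map_keys _ hnodup [], hkeys]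
  apply List.map_congr_left
  intro b _
  rw [hget]

theorem pvA_eq (batches : List (Int × Int)) :
    getPlates batches =
      pvItemsOf (PySem.Dict.ofList batches)
        (PySem.Set.ofList (PySem.Dict.ofList batches).values) := by
  unfold getPlates
  dsimp only
  have hnd := PySem.Dict.nodup_keys_ofList batches
  rw [show (fun (plate : PySem.Dict Int (String × String)) (bnum : Int) =>
        ((PySem.Dict.ofList batches).keys.foldl
          (pvStepA (PySem.Dict.ofList batches) bnum
            ("WP65" ++ PySem.Str.zfill (PySem.Int.toStr (bnum * 3)) 4)) (plate, 0, 0)).1) =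
      pvF (PySem.Dict.ofList batches) from
    funext fun plate => funext fun bnum =>
      pvProcessA_eq_F (PySem.Dict.ofList batches) hnd bnum plate]
  rw [show (PySem.Dict.empty : PySem.Dict Int (String × String)) =
        PySem.Dict.mk (pvItemsOf (PySem.Dict.ofList batches) []) from rfl,
      pvFoldF (PySem.Dict.ofList batches) hnd _ [] List.nodup_nil,
      PySem.Set.update_nil_left]

theorem pvB_eq (batches : List (Int × Int)) :
    getPlates_alt batches =
      pvItemsOf (PySem.Dict.ofList batches)
        (PySem.Set.ofList (PySem.Dict.ofList batches).values) := by
  unfold getPlates_alt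
  dsimp only
  have hnd := PySem.Dict.nodup_keys_ofList batches
  rw [pvGroups_items (PySem.Dict.ofList batches), List.foldl_map]
  rw [show (fun (plate : PySem.Dict Int (String × String)) (b : Int) =>
        (PySem.List.enumerate (pvKeysOf (PySem.Dict.ofList batches) b) 0).foldl
          (pvStepB ("WP65" ++ PySem.Str.zfill (PySem.Int.toStr (b * 3)) 4)) plate) =
      pvF (PySem.Dict.ofList batches) from rfl]
  rw [show (PySem.Dict.empty : PySem.Dict Int (String × String)) =
        PySem.Dict.mk (pvItemsOf (PySem.Dict.ofList batches) []) from rfl,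
      pvFoldF (PySem.Dict.ofList batches) hnd _ [] List.nodup_nil,
      PySem.Set.update_nil_left, PySem.Set.ofList_ofList]

-- ===== VERDICT (by name: the statement is the Claim_ definition above) =====
theorem getPlates_spec : Claim_equal_getPlates := by
  intro batches _
  unfold Spec_getPlates
  rw [pvA_eq, pvB_eq]
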